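-- pv_equiv track=rewrite | github.com/Eryzo1/Python-First-Year | yahtzee1.py | fill_upper_section
-- ===== SOURCE A (Python) =====
-- def sum_of_given_number(roll: tuple, number: int) -> int:
--     """
--     Returns the sum of the values in the roll that match the given number.
--     Example: sum_of_given_number((2,6,2,6,1), 6) = 12
--     """
--     # Appending the values inside of a list so that we can find the sum of all the values that match the number
--     my_list = []
--     for i in range(len(roll)):
--         if roll[i] == number:
--             my_list.append(roll[i])
--     sum_of_values = sum(my_list)
--     return sum_of_values
--
-- def fill_upper_section(roll: tuple) -> list:
--     """
--     Returns a list of the sums of all values in the roll.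
--     """
--     alist = []
--     my_list = [1, 2, 3, 4, 5, 6]
--     for i in range(len(my_list)):
--         if my_list[i] in roll:
--             sum_of_values = sum_of_given_number(roll, my_list[i])
--             alist.append(sum_of_values)
--         else:
--             alist.append(0)
--     return alist
-- ===== SOURCE B (Python) =====
-- def fill_upper_section(roll: tuple) -> list:
--     """
--     Returns a list of the sums of all values in the roll.
--     Single pass: bucket each die's value by its face instead of rescanning
--     the roll once per face.
--     """
--     sums = [0] * 6
--     for v in roll:
--         if 1 <= v <= 6:
--             sums[v - 1] += v
--     return sums
-- ===== Notes on version B (the rewrite author's own statement) =====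
-- stated objective: faster
-- what changed: Replaces A's per-face rescans (membership test plus a filtering sum for each of the six faces) with a single pass over the roll that accumulates each die into a length-6 bucket list.
import Mathlib
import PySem

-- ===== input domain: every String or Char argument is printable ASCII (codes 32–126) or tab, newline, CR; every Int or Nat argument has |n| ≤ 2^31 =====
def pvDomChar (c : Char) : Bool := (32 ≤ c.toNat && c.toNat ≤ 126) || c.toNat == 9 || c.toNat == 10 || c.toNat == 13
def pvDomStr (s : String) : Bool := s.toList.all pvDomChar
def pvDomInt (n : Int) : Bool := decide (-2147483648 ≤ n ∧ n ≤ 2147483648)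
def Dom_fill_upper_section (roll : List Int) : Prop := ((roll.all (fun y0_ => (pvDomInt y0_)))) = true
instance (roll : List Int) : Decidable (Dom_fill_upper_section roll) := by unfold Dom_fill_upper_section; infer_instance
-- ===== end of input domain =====

-- B replaces A's per-face rescans of the roll with a single bucketing pass; equivalence of return values is proved below.


-- ===== PORT A =====
-- 'for i in range(len(roll)): … roll[i] …' visits exactly the elements of roll in order,
-- so it is ported as a fold over roll itself; my_list is built by appends, then summed.
def sum_of_given_number (roll : List Int) (number : Int) : Int :=
  let my_list := roll.foldl (fun acc v => if v = number then acc ++ [v] else acc) []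
  my_list.foldl (· + ·) 0

def fill_upper_section (roll : List Int) : List Int :=
  ([1, 2, 3, 4, 5, 6] : List Int).foldl
    (fun alist n =>
      if n ∈ roll then alist ++ [sum_of_given_number roll n] else alist ++ [0]) []

-- ===== PORT B =====
def fill_upper_section_alt (roll : List Int) : List Int :=
  roll.foldl
    (fun sums v =>
      if 1 ≤ v ∧ v ≤ 6 then sums.set (v - 1).toNat (sums.getD (v - 1).toNat 0 + v) else sums)
    [0, 0, 0, 0, 0, 0]

-- ===== PRECONDITION & SPEC =====
def Spec_fill_upper_section (roll : List Int) (out : List Int) : Prop := out = fill_upper_section_alt roll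
instance (roll : List Int) (out : List Int) : Decidable (Spec_fill_upper_section roll out) := by unfold Spec_fill_upper_section; infer_instance

-- ===== CLAIM (what is proved, stated in full; the proofs are below) =====
def Claim_equal_fill_upper_section : Prop := ∀ (roll : List Int), Dom_fill_upper_section roll → Spec_fill_upper_section roll (fill_upper_section roll)

-- ===== LEMMAS AND PROOFS =====

-- S n roll = sum of the elements of roll equal to n
def S (n : Int) : List Int → Int
  | [] => 0
  | v :: l => (if v = n then v else 0) + S n l

theorem sum_fold_eq (n : Int) :
    ∀ (roll acc : List Int) (init : Int),
      (roll.foldl (fun acc v => if v = n then acc ++ [v] else acc) acc).foldl (· + ·) init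
        = acc.foldl (· + ·) init + S n roll := by
  intro roll
  induction roll with
  | nil => intro acc init; simp [S]
  | cons v l ih =>
    intro acc init
    by_cases h : v = n
    · simp only [List.foldl_cons, ih, List.foldl_append, List.foldl_nil, S, if_pos h]
      ring
    · simp only [List.foldl_cons, ih, S, if_neg h]
      ring

theorem sgn_eq (roll : List Int) (n : Int) :
    sum_of_given_number roll n = S n roll := by
  unfold sum_of_given_number
  simpa using sum_fold_eq n roll [] 0

theorem S_not_mem (roll : List Int) (n : Int) (h : n ∉ roll) : S n roll = 0 := by
  induction roll with
  | nil => rfl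
  | cons v l ih =>
    have hv : v ≠ n := fun hvn => h (hvn ▸ List.mem_cons_self)
    simp only [S, if_neg hv, zero_add]
    exact ih (fun hm => h (List.mem_cons_of_mem _ hm))

theorem alt_fold (roll : List Int) :
    ∀ (a b c d e f : Int),
      roll.foldl
        (fun sums v =>
          if 1 ≤ v ∧ v ≤ 6 then sums.set (v - 1).toNat (sums.getD (v - 1).toNat 0 + v) else sums)
        [a, b, c, d, e, f]
        = [a + S 1 roll, b + S 2 roll, c + S 3 roll, d + S 4 roll, e + S 5 roll, f + S 6 roll] := by
  induction roll with
  | nil => intro a b c d e f; simp [S]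
  | cons v l ih =>
    intro a b c d e f
    by_cases h : 1 ≤ v ∧ v ≤ 6
    · have hv : v = 1 ∨ v = 2 ∨ v = 3 ∨ v = 4 ∨ v = 5 ∨ v = 6 := by omega
      rcases hv with h1 | h1 | h1 | h1 | h1 | h1
      · subst h1
        have hs : (if (1:Int) ≤ 1 ∧ (1:Int) ≤ 6 then
              ([a, b, c, d, e, f] : List Int).set ((1:Int) - 1).toNat
                (([a, b, c, d, e, f] : List Int).getD ((1:Int) - 1).toNat 0 + 1)
            else [a, b, c, d, e, f]) = [a + 1, b, c, d, e, f] := by rfl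
        rw [List.foldl_cons, hs, ih]
        simp [S, add_assoc]
      · subst h1
        have hs : (if (1:Int) ≤ 2 ∧ (2:Int) ≤ 6 then
              ([a, b, c, d, e, f] : List Int).set ((2:Int) - 1).toNat
                (([a, b, c, d, e, f] : List Int).getD ((2:Int) - 1).toNat 0 + 2)
            else [a, b, c, d, e, f]) = [a, b + 2, c, d, e, f] := by rfl
        rw [List.foldl_cons, hs, ih]
        simp [S, add_assoc]
      · subst h1
        have hs : (if (1:Int) ≤ 3 ∧ (3:Int) ≤ 6 then
              ([a, b, c, d, e, f] : List Int).set ((3:Int) - 1).toNat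
                (([a, b, c, d, e, f] : List Int).getD ((3:Int) - 1).toNat 0 + 3)
            else [a, b, c, d, e, f]) = [a, b, c + 3, d, e, f] := by rfl
        rw [List.foldl_cons, hs, ih]
        simp [S, add_assoc]
      · subst h1
        have hs : (if (1:Int) ≤ 4 ∧ (4:Int) ≤ 6 then
              ([a, b, c, d, e, f] : List Int).set ((4:Int) - 1).toNat
                (([a, b, c, d, e, f] : List Int).getD ((4:Int) - 1).toNat 0 + 4)
            else [a, b, c, d, e, f]) = [a, b, c, d + 4, e, f] := by rfl
        rw [List.foldl_cons, hs, ih]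
        simp [S, add_assoc]
      · subst h1
        have hs : (if (1:Int) ≤ 5 ∧ (5:Int) ≤ 6 then
              ([a, b, c, d, e, f] : List Int).set ((5:Int) - 1).toNat
                (([a, b, c, d, e, f] : List Int).getD ((5:Int) - 1).toNat 0 + 5)
            else [a, b, c, d, e, f]) = [a, b, c, d, e + 5, f] := by rfl
        rw [List.foldl_cons, hs, ih]
        simp [S, add_assoc]
      · subst h1
        have hs : (if (1:Int) ≤ 6 ∧ (6:Int) ≤ 6 then
              ([a, b, c, d, e, f] : List Int).set ((6:Int) - 1).toNat
                (([a, b, c, d, e, f] : List Int).getD ((6:Int) - 1).toNat 0 + 6)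
            else [a, b, c, d, e, f]) = [a, b, c, d, e, f + 6] := by rfl
        rw [List.foldl_cons, hs, ih]
        simp [S, add_assoc]
    · have h1 : v ≠ 1 := by omega
      have h2 : v ≠ 2 := by omega
      have h3 : v ≠ 3 := by omega
      have h4 : v ≠ 4 := by omega
      have h5 : v ≠ 5 := by omega
      have h6 : v ≠ 6 := by omega
      simp only [List.foldl_cons, if_neg h, ih, S, if_neg h1, if_neg h2, if_neg h3, if_neg h4,
        if_neg h5, if_neg h6, zero_add]

theorem entry_eq (roll : List Int) (n : Int) :
    (if n ∈ roll then sum_of_given_number roll n else 0) = S n roll := by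
  by_cases h : n ∈ roll
  · simp [h, sgn_eq]
  · simp [h, S_not_mem roll n h]

-- ===== VERDICT (by name: the statement is the Claim_ definition above) =====
theorem fill_upper_section_spec : Claim_equal_fill_upper_section := by
  intro roll _
  unfold Spec_fill_upper_section fill_upper_section fill_upper_section_alt
  rw [alt_fold]
  have hstep : ∀ (alist : List Int) (n : Int),
      (if n ∈ roll then alist ++ [sum_of_given_number roll n] else alist ++ [0])
        = alist ++ [if n ∈ roll then sum_of_given_number roll n else 0] := by
    intro alist n; split_ifs <;> rfl
  simp only [hstep, entry_eq, List.foldl_cons, List.foldl_nil, List.nil_append,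
    List.cons_append]
  simp
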